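-- pv_equiv track=rewrite | github.com/NYX-ML69/CMATRIX | cmatrix/cmx_tools/compile/optimization_passes.py | _assign_memory_pools
-- ===== SOURCE A (Python) =====
-- from typing import Dict, Any, List, Optional
--
-- def _assign_memory_pools(lifetimes: Dict[str, tuple]) -> Dict[str, int]:
--     """Assign tensors to memory pools based on lifetimes."""
--     pools = {}
--     pool_schedule = {}  # pool_id -> [(start, end)]
--     next_pool_id = 0
--
--     # Sort tensors by creation time
--     sorted_tensors = sorted(lifetimes.items(), key=lambda x: x[1][0])
--
--     for tensor_name, (start, end) in sorted_tensors:
--         # Find a pool that's free during tensor lifetime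
--         assigned_pool = None
--
--         for pool_id, schedule in pool_schedule.items():
--             can_use_pool = True
--             for pool_start, pool_end in schedule:
--                 if not (end < pool_start or start > pool_end):
--                     can_use_pool = False
--                     break
--
--             if can_use_pool:
--                 assigned_pool = pool_id
--                 break
--
--         # Create new pool if needed
--         if assigned_pool is None:
--             assigned_pool = next_pool_id
--             next_pool_id += 1
--             pool_schedule[assigned_pool] = []
--
--         # Assign tensor to pool
--         pools[tensor_name] = assigned_pool
--         pool_schedule[assigned_pool].append((start, end))
--
--     return pools
-- ===== SOURCE B (Python) =====
-- def _assign_memory_pools(lifetimes):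
--     """Assign tensors to memory pools based on lifetimes.
--
--     Different decomposition from the original single pass over tensors with an
--     inner scan of all pools: pools are peeled off one per pass.  Each pass
--     sweeps the remaining tensors (in start order) and greedily packs into the
--     current pool every tensor compatible with what the pool already holds;
--     the tensors left over form the input of the next pass, which opens the
--     next pool.  This yields exactly the first-fit assignment.
--     """
--     order = sorted(lifetimes.items(), key=lambda kv: kv[1][0])
--     assignment = {}
--     remaining = order
--     pool_id = 0
--     while remaining:
--         taken = []  # intervals already placed in the current pool
--         rest = []
--         for name, (start, end) in remaining:
--             if all(end < ps or start > pe for ps, pe in taken):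
--                 assignment[name] = pool_id
--                 taken.append((start, end))
--             else:
--                 rest.append((name, (start, end)))
--         remaining = rest
--         pool_id += 1
--     return {name: assignment[name] for name, _ in order}
-- ===== Notes on version B (the rewrite author's own statement) =====
-- stated objective: alternative
-- what changed: A makes one pass over the tensors, scanning every existing pool's interval list per tensor; B transposes the loops: it peels off one pool per pass, each pass sweeping the remaining tensors and greedily packing every compatible one into the current pool, the leftovers feeding the next pass; the results coincide because first-fit pool k contents are exactly the greedy packing of what pools 0..k-1 rejected.
import Mathlib
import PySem

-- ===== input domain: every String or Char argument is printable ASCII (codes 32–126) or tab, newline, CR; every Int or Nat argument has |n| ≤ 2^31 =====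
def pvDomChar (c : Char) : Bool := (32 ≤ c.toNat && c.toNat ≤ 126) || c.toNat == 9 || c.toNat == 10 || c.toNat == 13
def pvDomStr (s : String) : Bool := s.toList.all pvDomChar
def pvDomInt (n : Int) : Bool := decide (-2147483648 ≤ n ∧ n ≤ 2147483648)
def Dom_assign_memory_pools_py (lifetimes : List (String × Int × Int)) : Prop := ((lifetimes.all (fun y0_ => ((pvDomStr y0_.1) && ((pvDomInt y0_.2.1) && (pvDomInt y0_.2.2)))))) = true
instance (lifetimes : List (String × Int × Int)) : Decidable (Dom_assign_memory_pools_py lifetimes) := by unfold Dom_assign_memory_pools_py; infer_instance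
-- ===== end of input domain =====

-- B transposes A's loops: instead of one pass over tensors with an inner scan over all pools,
-- it peels off one pool per pass over the remaining tensors (objective: alternative; same value).

-- ===== PORT A =====
-- A's 'for pool_id, schedule in pool_schedule.items(): … break' scan; the inner
-- 'for pool_start, pool_end in schedule: … break' overlap check is List.all (same short-circuit)
def pvFindPoolA (s e : Int) : List (Int × List (Int × Int)) → Option Int
  | [] => none
  | (pid, sch) :: rest =>
    if sch.all (fun iv => decide (e < iv.1) || decide (s > iv.2)) then some pid
    else pvFindPoolA s e rest

-- one iteration of A's main loop; state = (pools, pool_schedule, next_pool_id)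
def pvStepA (st : PySem.Dict String Int × PySem.Dict Int (List (Int × Int)) × Int)
    (x : String × Int × Int) : PySem.Dict String Int × PySem.Dict Int (List (Int × Int)) × Int :=
  match pvFindPoolA x.2.1 x.2.2 st.2.1.items with
  | some p => (st.1.insert x.1 p, st.2.1.modify p [] (fun l => l ++ [(x.2.1, x.2.2)]), st.2.2)
  | none => (st.1.insert x.1 st.2.2,
      (st.2.1.insert st.2.2 []).modify st.2.2 [] (fun l => l ++ [(x.2.1, x.2.2)]), st.2.2 + 1)

def assign_memory_pools_py (lifetimes : List (String × Int × Int)) : List (String × Int) :=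
  let sorted_tensors := PySem.List.sorted (PySem.Dict.ofList lifetimes).items (fun x => x.2.1)
  (sorted_tensors.foldl pvStepA (PySem.Dict.empty, PySem.Dict.empty, 0)).1.items

-- ===== PORT B =====
-- one pass of B's while-loop body: the 'for name, (start, end) in remaining' sweep;
-- state = (assignment dict so far, rest); taken = the current pool's intervals
def pvPassB : List (Int × Int) → PySem.Dict String Int → Int → List (String × Int × Int) →
    PySem.Dict String Int × List (String × Int × Int)
  | _, asg, _, [] => (asg, [])
  | taken, asg, pid, x :: xs =>
    if taken.all (fun iv => decide (x.2.2 < iv.1) || decide (x.2.1 > iv.2)) then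
      pvPassB (taken ++ [(x.2.1, x.2.2)]) (asg.insert x.1 pid) pid xs
    else
      ((pvPassB taken asg pid xs).1, x :: (pvPassB taken asg pid xs).2)

-- termination of the while-loop: a pass never lengthens the remainder (cited in decreasing_by)
lemma pvPassB_rest_len (xs : List (String × Int × Int)) :
    ∀ (taken : List (Int × Int)) (asg : PySem.Dict String Int) (pid : Int),
      (pvPassB taken asg pid xs).2.length ≤ xs.length := by
  induction xs with
  | nil => intro taken asg pid; simp [pvPassB]
  | cons x xs ih =>
    intro taken asg pid
    simp only [pvPassB]
    split
    · exact le_trans (ih _ _ _) (Nat.le_succ _)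
    · simpa using ih taken asg pid

-- B's 'while remaining:' loop
def pvLoopB : PySem.Dict String Int → Int → List (String × Int × Int) → PySem.Dict String Int
  | asg, _, [] => asg
  | asg, pid, x :: xs =>
    pvLoopB (pvPassB [] asg pid (x :: xs)).1 (pid + 1) (pvPassB [] asg pid (x :: xs)).2
termination_by _asg _pid rem => rem.length
decreasing_by
  have h := pvPassB_rest_len xs [(x.2.1, x.2.2)] (asg.insert x.1 pid) pid
  simp only [pvPassB, List.all_nil, if_true, List.nil_append, List.length_cons]
  omega

def assign_memory_pools_py_alt (lifetimes : List (String × Int × Int)) : List (String × Int) :=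
  let order := PySem.List.sorted (PySem.Dict.ofList lifetimes).items (fun x => x.2.1)
  let asg := pvLoopB PySem.Dict.empty 0 order
  -- final comprehension '{name: assignment[name] for name, _ in order}'; every name was
  -- assigned in some pass, so Python's lookup never raises and getD's default is never read
  order.map (fun kv => (kv.1, asg.getD kv.1 0))

-- ===== PRECONDITION & SPEC =====
def Spec_assign_memory_pools_py (lifetimes : List (String × Int × Int)) (out : List (String × Int)) : Prop := out = assign_memory_pools_py_alt lifetimes
instance (lifetimes : List (String × Int × Int)) (out : List (String × Int)) : Decidable (Spec_assign_memory_pools_py lifetimes out) := by unfold Spec_assign_memory_pools_py; infer_instance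

-- ===== CLAIM (what is proved, stated in full; the proofs are below) =====
def Claim_equal_assign_memory_pools_py : Prop := ∀ (lifetimes : List (String × Int × Int)), Dom_assign_memory_pools_py lifetimes → Spec_assign_memory_pools_py lifetimes (assign_memory_pools_py lifetimes)

-- ===== LEMMAS AND PROOFS =====

-- the shared overlap test
def pvFits (c : List (Int × Int)) (s e : Int) : Bool :=
  c.all (fun iv => decide (e < iv.1) || decide (s > iv.2))

-- index of the first pool (in a list-of-schedules model) that fits
def pvFindIdx (s e : Int) : List (List (Int × Int)) → Option Nat
  | [] => none
  | c :: rest => if pvFits c s e then some 0 else (pvFindIdx s e rest).map (· + 1)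

-- one first-fit step on the list-of-schedules model
def pvFFStep : List (List (Int × Int)) → Int → Int → Int × List (List (Int × Int))
  | [], s, e => (0, [[(s, e)]])
  | c :: rest, s, e =>
    if pvFits c s e then (0, (c ++ [(s, e)]) :: rest)
    else ((pvFFStep rest s e).1 + 1, c :: (pvFFStep rest s e).2)

-- the whole first-fit assignment (the functional core of A)
def pvFF : List (List (Int × Int)) → List (String × Int × Int) → List (String × Int)
  | _, [] => []
  | scheds, x :: xs =>
    (x.1, (pvFFStep scheds x.2.1 x.2.2).1) :: pvFF (pvFFStep scheds x.2.1 x.2.2).2 xs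

-- A's pool_schedule dict as an association list over the model
def pvEnum : Int → List (List (Int × Int)) → List (Int × List (Int × Int))
  | _, [] => []
  | k, c :: cs => (k, c) :: pvEnum (k + 1) cs

-- one peeling pass, dict-free: names taken into the current pool, and the remainder
def pvPassN : List (Int × Int) → List (String × Int × Int) → List String × List (String × Int × Int)
  | _, [] => ([], [])
  | taken, x :: xs =>
    if pvFits taken x.2.1 x.2.2 then
      (x.1 :: (pvPassN (taken ++ [(x.2.1, x.2.2)]) xs).1, (pvPassN (taken ++ [(x.2.1, x.2.2)]) xs).2)
    else
      ((pvPassN taken xs).1, x :: (pvPassN taken xs).2)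

lemma pvPassN_rest_len (xs : List (String × Int × Int)) :
    ∀ taken, (pvPassN taken xs).2.length ≤ xs.length := by
  induction xs with
  | nil => intro taken; simp [pvPassN]
  | cons x xs ih =>
    intro taken
    simp only [pvPassN]
    split
    · exact le_trans (ih _) (Nat.le_succ _)
    · simpa using ih taken

-- the pairs produced by peeling, with pool numbers relative to the current pass
def pvPeel : List (String × Int × Int) → List (String × Int)
  | [] => []
  | x :: xs =>
    ((pvPassN [] (x :: xs)).1.map (fun n => (n, (0 : Int)))) ++
      (pvPeel (pvPassN [] (x :: xs)).2).map (fun p => (p.1, p.2 + 1))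
termination_by rem => rem.length
decreasing_by
  have h := pvPassN_rest_len xs [(x.2.1, x.2.2)]
  simp only [pvPassN, pvFits, List.all_nil, if_true, List.nil_append, List.length_cons]
  omega

lemma pvEnum_bounds (cs : List (List (Int × Int))) :
    ∀ (k : Int) (p : Int × List (Int × Int)), p ∈ pvEnum k cs → k ≤ p.1 ∧ p.1 < k + cs.length := by
  induction cs with
  | nil => intro k p hp; simp [pvEnum] at hp
  | cons c cs ih =>
    intro k p hp
    simp only [pvEnum, List.mem_cons] at hp
    rcases hp with rfl | hp
    · simp
    · have := ih (k + 1) p hp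
      simp only [List.length_cons]
      push_cast
      omega

lemma findA_eq_findIdx (s e : Int) (cs : List (List (Int × Int))) :
    ∀ (k : Int), pvFindPoolA s e (pvEnum k cs) = (pvFindIdx s e cs).map (fun j => k + (j : Int)) := by
  induction cs with
  | nil => intro k; simp [pvEnum, pvFindPoolA, pvFindIdx]
  | cons c cs ih =>
    intro k
    simp only [pvEnum, pvFindPoolA, pvFindIdx, pvFits]
    by_cases h : (c.all fun iv => decide (e < iv.1) || decide (s > iv.2)) = true
    · simp [h]
    · rw [if_neg h, if_neg h, ih (k + 1)]
      cases hfi : pvFindIdx s e cs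
      · simp
      · simp
        ring

lemma findIdx_lt (s e : Int) (cs : List (List (Int × Int))) :
    ∀ i, pvFindIdx s e cs = some i → i < cs.length := by
  induction cs with
  | nil => intro i h; simp [pvFindIdx] at h
  | cons c cs ih =>
    intro i h
    simp only [pvFindIdx] at h
    split at h
    · cases h; simp
    · simp only [Option.map_eq_some_iff] at h
      obtain ⟨j, hj, rfl⟩ := h
      have := ih j hj
      simp only [List.length_cons]; omega

lemma ffStep_none (s e : Int) (cs : List (List (Int × Int)))
    (h : pvFindIdx s e cs = none) : pvFFStep cs s e = ((cs.length : Int), cs ++ [[(s, e)]]) := by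
  induction cs with
  | nil => simp [pvFFStep]
  | cons c cs ih =>
    simp only [pvFindIdx] at h
    split at h
    · simp at h
    · simp only [Option.map_eq_none_iff] at h
      rename_i hfit
      simp only [pvFFStep, if_neg hfit, ih h]
      simp only [List.length_cons, List.cons_append, Prod.mk.injEq]
      constructor
      · push_cast; ring
      · trivial

lemma ffStep_some (s e : Int) (cs : List (List (Int × Int))) :
    ∀ i (_h : pvFindIdx s e cs = some i) (_hlt : i < cs.length),
      pvFFStep cs s e = ((i : Int), cs.set i (cs[i] ++ [(s, e)])) := by
  induction cs with
  | nil => intro i h hlt; simp [pvFindIdx] at h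
  | cons c cs ih =>
    intro i h hlt
    simp only [pvFindIdx] at h
    split at h
    · cases h
      rename_i hfit
      simp [pvFFStep, hfit]
    · rename_i hfit
      simp only [Option.map_eq_some_iff] at h
      obtain ⟨j, hj, rfl⟩ := h
      have hjlt : j < cs.length := findIdx_lt s e cs j hj
      simp only [pvFFStep, if_neg hfit, ih j hj hjlt]
      simp only [List.set_cons_succ, List.getElem_cons_succ, Prod.mk.injEq]
      constructor
      · push_cast; ring
      · trivial

lemma mem_pvEnum_get (cs : List (List (Int × Int))) :
    ∀ (k : Int) (j : Nat) (h : j < cs.length), (k + (j : Int), cs[j]) ∈ pvEnum k cs := by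
  induction cs with
  | nil => intro k j h; simp at h
  | cons c cs ih =>
    intro k j h
    cases j with
    | zero => simp [pvEnum]
    | succ j =>
      have heq : k + ((j + 1 : Nat) : Int) = (k + 1) + (j : Int) := by push_cast; ring
      rw [heq]
      simp only [pvEnum, List.mem_cons, List.getElem_cons_succ]
      exact Or.inr (ih (k + 1) j (by simpa using h))

lemma keys_pvEnum_nodup (cs : List (List (Int × Int))) :
    ∀ (k : Int), ((pvEnum k cs).map Prod.fst).Nodup := by
  induction cs with
  | nil => intro k; simp [pvEnum]
  | cons c cs ih =>
    intro k
    simp only [pvEnum, List.map_cons, List.nodup_cons]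
    refine ⟨?_, ih (k + 1)⟩
    intro hmem
    obtain ⟨p, hp, hpk⟩ := List.mem_map.mp hmem
    have := pvEnum_bounds cs (k + 1) p hp
    omega

lemma map_replace_pvEnum (cs : List (List (Int × Int))) :
    ∀ (k : Int) (j : Nat) (v : List (Int × Int)) (_h : j < cs.length),
      (pvEnum k cs).map (fun p => if p.1 == k + (j : Int) then (k + (j : Int), v) else p)
        = pvEnum k (cs.set j v) := by
  induction cs with
  | nil => intro k j v h; simp at h
  | cons c cs ih =>
    intro k j v h
    cases j with
    | zero =>
      simp only [pvEnum, List.map_cons, List.set_cons_zero]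
      congr 1
      · simp
      · rw [show (pvEnum (k+1) cs) = (pvEnum (k+1) cs).map id by simp]
        rw [List.map_map]
        apply List.map_congr_left
        intro p hp
        have hb := pvEnum_bounds cs (k + 1) p hp
        have hpk : p.1 ≠ k := by omega
        simp [hpk]
    | succ j =>
      simp only [pvEnum, List.map_cons, List.set_cons_succ]
      congr 1
      · have hj0 : ((j : Int) + 1) ≠ 0 := by omega
        simp
        intro h2
        exact absurd h2 hj0
      · have := ih (k + 1) j v (by simpa using h)
        rw [← this]
        apply List.map_congr_left
        intro p hp
        have heq : (k + 1 + (j : Int)) = k + ((j + 1 : Nat) : Int) := by push_cast; omega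
        rw [heq]

lemma pvEnum_append_singleton (cs : List (List (Int × Int))) :
    ∀ (k : Int) (c : List (Int × Int)),
      pvEnum k (cs ++ [c]) = pvEnum k cs ++ [(k + (cs.length : Int), c)] := by
  induction cs with
  | nil => intro k c; simp [pvEnum]
  | cons c' cs ih =>
    intro k c
    simp only [List.cons_append, pvEnum, ih (k + 1) c, List.length_cons]
    have heq : k + 1 + (cs.length : Int) = k + ((cs.length + 1 : Nat) : Int) := by push_cast; ring
    rw [heq]

-- one A-step tracked on the model
lemma stepA_model (pools : PySem.Dict String Int) (sched : PySem.Dict Int (List (Int × Int)))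
    (scheds : List (List (Int × Int))) (x : String × Int × Int)
    (hs : sched.items = pvEnum 0 scheds) :
    ∃ sched',
      pvStepA (pools, sched, (scheds.length : Int)) x
        = (pools.insert x.1 (pvFFStep scheds x.2.1 x.2.2).1, sched',
           (((pvFFStep scheds x.2.1 x.2.2).2.length : Nat) : Int))
      ∧ sched'.items = pvEnum 0 (pvFFStep scheds x.2.1 x.2.2).2 := by
  obtain ⟨nm, s, e⟩ := x
  have hknd : sched.keys.Nodup := by
    have := keys_pvEnum_nodup scheds 0
    rw [← hs] at this
    simpa [PySem.Dict.keys] using this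
  cases hfi : pvFindIdx s e scheds with
  | none =>
    have hfA : pvFindPoolA s e sched.items = none := by
      rw [hs, findA_eq_findIdx s e scheds 0, hfi]; rfl
    have hffs := ffStep_none s e scheds hfi
    have hcont : sched.contains ((scheds.length : Nat) : Int) = false := by
      rw [Bool.eq_false_iff]
      intro hc
      rw [PySem.Dict.contains_iff_mem_keys] at hc
      have hc' : ((scheds.length : Nat) : Int) ∈ sched.items.map Prod.fst := by
        simpa [PySem.Dict.keys] using hc
      obtain ⟨p, hp, hpk⟩ := List.mem_map.mp hc'
      rw [hs] at hp
      have hb := pvEnum_bounds scheds 0 p hp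
      omega
    refine ⟨(sched.insert (scheds.length : Int) []).modify (scheds.length : Int) []
        (fun l => l ++ [(s, e)]), ?_, ?_⟩
    · simp only [pvStepA, hfA, hffs]
      refine Prod.ext rfl (Prod.ext rfl ?_)
      simp only [List.length_append, List.length_cons, List.length_nil]
      push_cast; ring
    · have hins := PySem.Dict.items_insert_of_not_contains sched
        ([] : List (Int × Int)) hcont
      have hcont1 := PySem.Dict.contains_insert_self sched ((scheds.length : Nat) : Int)
        ([] : List (Int × Int))
      rw [hffs, PySem.Dict.modify, PySem.Dict.getD_insert_self,
        PySem.Dict.items_insert_of_contains _ _ hcont1, hins, hs, List.map_append,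
        pvEnum_append_singleton scheds 0 [(s, e)]]
      congr 1
      · conv_rhs => rw [show pvEnum 0 scheds = (pvEnum 0 scheds).map id from by simp]
        apply List.map_congr_left
        intro p hp
        have hb := pvEnum_bounds scheds 0 p hp
        have hne : p.1 ≠ ((scheds.length : Nat) : Int) := by omega
        simp [hne]
      · simp
  | some i =>
    have hilt := findIdx_lt s e scheds i hfi
    have hfA : pvFindPoolA s e sched.items = some ((i : Nat) : Int) := by
      rw [hs, findA_eq_findIdx s e scheds 0, hfi]; simp
    have hffs := ffStep_some s e scheds i hfi hilt
    have hmem' : (((i : Nat) : Int), scheds[i]) ∈ sched.items := by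
      rw [hs]
      have := mem_pvEnum_get scheds 0 i hilt
      simpa using this
    have hgetD := PySem.Dict.getD_of_mem_items sched hmem' hknd ([] : List (Int × Int))
    have hcont : sched.contains ((i : Nat) : Int) = true := by
      rw [PySem.Dict.contains_iff_mem_keys]
      show ((i : Nat) : Int) ∈ sched.items.map Prod.fst
      exact List.mem_map.mpr ⟨_, hmem', rfl⟩
    refine ⟨sched.modify ((i : Nat) : Int) [] (fun l => l ++ [(s, e)]), ?_, ?_⟩
    · simp only [pvStepA, hfA, hffs]
      refine Prod.ext rfl (Prod.ext rfl ?_)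
      simp [List.length_set]
    · rw [hffs, PySem.Dict.modify, hgetD, PySem.Dict.items_insert_of_contains _ _ hcont, hs]
      have := map_replace_pvEnum scheds 0 i (scheds[i] ++ [(s, e)]) hilt
      simpa using this

-- the A fold equals inserting first-fit pairs
lemma foldA (L : List (String × Int × Int)) :
    ∀ (pools : PySem.Dict String Int) (sched : PySem.Dict Int (List (Int × Int)))
      (scheds : List (List (Int × Int))), sched.items = pvEnum 0 scheds →
      (L.foldl pvStepA (pools, sched, (scheds.length : Int))).1
        = (pvFF scheds L).foldl (fun d p => d.insert p.1 p.2) pools := by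
  induction L with
  | nil => intro pools sched scheds hs; rfl
  | cons x L ih =>
    intro pools sched scheds hs
    obtain ⟨sched', hstep, hs'⟩ := stepA_model pools sched scheds x hs
    rw [List.foldl_cons, hstep, ih _ sched' _ hs']
    rfl

lemma names_pvFF (L : List (String × Int × Int)) :
    ∀ scheds, (pvFF scheds L).map Prod.fst = L.map Prod.fst := by
  induction L with
  | nil => intro scheds; rfl
  | cons x L ih => intro scheds; simp [pvFF, ih]

-- peeling one pool off the front of the schedule list (the heart of the equivalence)
lemma peel_pool (L : List (String × Int × Int)) :
    ∀ (c : List (Int × Int)) (rest : List (List (Int × Int))),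
      (pvFF (c :: rest) L).Perm
        (((pvPassN c L).1.map (fun n => (n, (0 : Int)))) ++
          (pvFF rest (pvPassN c L).2).map (fun p => (p.1, p.2 + 1))) := by
  induction L with
  | nil => intro c rest; simp [pvFF, pvPassN]
  | cons x xs ih =>
    intro c rest
    by_cases hfit : pvFits c x.2.1 x.2.2
    · simp only [pvFF, pvPassN, pvFFStep, if_pos hfit, List.map_cons, List.cons_append]
      exact List.Perm.cons _ (ih (c ++ [(x.2.1, x.2.2)]) rest)
    · simp only [pvFF, pvPassN, pvFFStep, if_neg hfit, List.map_cons]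
      refine (List.Perm.cons _ (ih c (pvFFStep rest x.2.1 x.2.2).2)).trans ?_
      exact List.perm_middle.symm

-- first-fit from no pools = peeling
lemma ff_eq_peel_aux (n : Nat) : ∀ L : List (String × Int × Int), L.length ≤ n →
    (pvFF [] L).Perm (pvPeel L) := by
  induction n with
  | zero =>
    intro L hL
    have : L = [] := List.eq_nil_of_length_eq_zero (Nat.le_zero.mp hL)
    subst this
    simp [pvFF, pvPeel]
  | succ n ih =>
    intro L hL
    cases L with
    | nil => simp [pvFF, pvPeel]
    | cons x xs =>
      have hih := ih (pvPassN [(x.2.1, x.2.2)] xs).2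
        (le_trans (pvPassN_rest_len xs [(x.2.1, x.2.2)]) (Nat.le_of_succ_le_succ hL))
      simp only [pvPeel, pvFF, pvFFStep, pvPassN, pvFits, List.all_nil,
        List.nil_append]
      refine List.Perm.cons _ ?_
      refine (peel_pool xs [(x.2.1, x.2.2)] []).trans ?_
      exact List.Perm.append_left _ (hih.map _)

lemma ff_eq_peel (L : List (String × Int × Int)) : (pvFF [] L).Perm (pvPeel L) :=
  ff_eq_peel_aux L.length L le_rfl

-- the dict pass is the dict-free pass plus inserts
lemma passB_eq_passN (xs : List (String × Int × Int)) :
    ∀ taken asg pid,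
      pvPassB taken asg pid xs
        = ((pvPassN taken xs).1.foldl (fun d n => d.insert n pid) asg, (pvPassN taken xs).2) := by
  induction xs with
  | nil => intro taken asg pid; simp [pvPassB, pvPassN]
  | cons x xs ih =>
    intro taken asg pid
    simp only [pvPassB, pvPassN, pvFits]
    split
    · simp only [ih, List.foldl_cons]
    · simp only [ih]

-- the while-loop is a fold of inserts over the peel pairs
lemma loopB_eq_foldl (n : Nat) : ∀ (rem : List (String × Int × Int)), rem.length ≤ n →
    ∀ asg pid, pvLoopB asg pid rem
      = (pvPeel rem).foldl (fun d p => d.insert p.1 (p.2 + pid)) asg := by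
  induction n with
  | zero =>
    intro rem hrem
    have : rem = [] := List.eq_nil_of_length_eq_zero (Nat.le_zero.mp hrem)
    subst this
    intro asg pid
    simp [pvLoopB, pvPeel]
  | succ n ih =>
    intro rem hrem asg pid
    cases rem with
    | nil => simp [pvLoopB, pvPeel]
    | cons x xs =>
      have hlen := le_trans (pvPassN_rest_len xs [(x.2.1, x.2.2)]) (Nat.le_of_succ_le_succ hrem)
      simp only [pvLoopB, passB_eq_passN, pvPeel, pvPassN, pvFits, List.all_nil,
        if_true, List.nil_append, List.map_cons, List.cons_append,
        List.foldl_append, List.foldl_map, List.foldl_cons]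
      rw [ih (pvPassN [(x.2.1, x.2.2)] xs).2 hlen]
      have h1 : (fun (d : PySem.Dict String Int) (n : String) => d.insert n (0 + pid))
          = fun d n => d.insert n pid := by
        funext d n; norm_num
      have h2 : (fun (d : PySem.Dict String Int) (p : String × Int) => d.insert p.1 (p.2 + 1 + pid))
          = fun d p => d.insert p.1 (p.2 + (pid + 1)) := by
        funext d p
        have : p.2 + 1 + pid = p.2 + (pid + 1) := by ring
        rw [this]
      simp only [h2, zero_add]

lemma names_pvPeel_nodup (L : List (String × Int × Int)) (h : (L.map Prod.fst).Nodup) :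
    ((pvPeel L).map Prod.fst).Nodup := by
  have hp := (ff_eq_peel L).map Prod.fst
  rw [names_pvFF L []] at hp
  exact hp.nodup_iff.mp h

-- ===== VERDICT (by name: the statement is the Claim_ definition above) =====
theorem assign_memory_pools_py_spec : Claim_equal_assign_memory_pools_py := by
  intro lifetimes _
  unfold Spec_assign_memory_pools_py
  simp only [assign_memory_pools_py, assign_memory_pools_py_alt]
  generalize horder : PySem.List.sorted (PySem.Dict.ofList lifetimes).items (fun x => x.2.1) = order
  -- distinct tensor names (dict keys, rearranged by the stable sort)
  have hnd : (order.map Prod.fst).Nodup := by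
    have hperm : order.Perm (PySem.Dict.ofList lifetimes).items := by
      rw [← horder]; exact PySem.List.sorted_perm _ _ _
    have hkeys : ((PySem.Dict.ofList lifetimes).items.map Prod.fst).Nodup := by
      have := PySem.Dict.nodup_keys_ofList (ν := Int × Int) lifetimes
      simpa [PySem.Dict.keys] using this
    exact ((hperm.map Prod.fst).nodup_iff).mpr hkeys
  -- A's fold = first-fit pairs
  have hA0 := foldA order PySem.Dict.empty PySem.Dict.empty [] rfl
  simp only [List.length_nil, Nat.cast_zero] at hA0
  have hffnd : ((pvFF [] order).map Prod.fst).Nodup := by rw [names_pvFF]; exact hnd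
  have hA : (order.foldl pvStepA (PySem.Dict.empty, PySem.Dict.empty, 0)).1.items
      = pvFF [] order := by
    rw [hA0, PySem.Dict.items_foldl_insert_fresh (pvFF [] order) Prod.fst Prod.snd
      PySem.Dict.empty (fun a _ => rfl) hffnd]
    simp
    rfl
  rw [hA]
  -- B's loop dict holds exactly the peel pairs
  rw [loopB_eq_foldl order.length order le_rfl PySem.Dict.empty 0]
  have hz : (fun (d : PySem.Dict String Int) (p : String × Int) => d.insert p.1 (p.2 + 0))
      = fun d p => d.insert p.1 p.2 := by
    funext d p; rw [add_zero]
  rw [hz]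
  have hperm2 : (pvFF [] order).Perm (pvPeel order) := ff_eq_peel order
  have hpeelnd := names_pvPeel_nodup order hnd
  have hbditems : ((pvPeel order).foldl (fun d p => d.insert p.1 p.2) PySem.Dict.empty).items
      = pvPeel order := by
    rw [PySem.Dict.items_foldl_insert_fresh (pvPeel order) Prod.fst Prod.snd
      PySem.Dict.empty (fun a _ => rfl) hpeelnd]
    simp
    rfl
  have hbdkeys : ((pvPeel order).foldl (fun d p => d.insert p.1 p.2) PySem.Dict.empty).keys.Nodup := by
    show (((pvPeel order).foldl (fun d p => d.insert p.1 p.2) PySem.Dict.empty).items.map Prod.fst).Nodup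
    rw [hbditems]; exact hpeelnd
  -- lengths agree
  have hlen : (pvFF [] order).length = order.length := by
    have := congrArg List.length (names_pvFF order [])
    simpa using this
  apply List.ext_getElem
  · simpa using hlen
  intro j hj1 hj2
  have hjord : j < order.length := by simpa using hj2
  have hj1' : j < (pvFF [] order).length := hj1
  -- names agree positionally
  have hjname : (pvFF [] order)[j].1 = order[j].1 := by
    have h := congrArg (fun l => l[j]?) (names_pvFF order [])
    simp only [List.getElem?_map] at h
    rw [List.getElem?_eq_getElem hj1', List.getElem?_eq_getElem hjord] at h
    simpa using h
  -- the dict lookup returns the first-fit pool of position j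
  have hmem : ((pvFF [] order)[j].1, (pvFF [] order)[j].2)
      ∈ ((pvPeel order).foldl (fun d p => d.insert p.1 p.2) PySem.Dict.empty).items := by
    rw [hbditems]
    exact hperm2.mem_iff.mp (by simp [List.getElem_mem hj1'])
  have hget := PySem.Dict.getD_of_mem_items _ hmem hbdkeys 0
  rw [List.getElem_map, ← hjname, hget]
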